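-- pv_equiv track=rewrite | github.com/polyphony-dev/polyphony | tests/loop/for09.py | for09
-- ===== SOURCE A (Python) =====
-- def for09(x):
--     y = x
--     z = 0
--     for i in range(10+x):
--         if i > 5:
--             z += 1
--             if i > 6:
--                 z += 1
--                 if i > 7:
--                     z += 1
--                     if i > 8:
--                         z += 1
--
--     return y + z
-- ===== SOURCE B (Python) =====
-- def for09(x):
--     n = 10 + x
--     z = sum(max(0, n - 1 - t) for t in (5, 6, 7, 8))
--     return x + z
-- ===== Notes on version B (the rewrite author's own statement) =====
-- stated objective: faster
-- what changed: Replaces the O(n) loop with nested threshold increments by a closed-form O(1) sum of max(0, n-1-t) over the four thresholds.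
import Mathlib
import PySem

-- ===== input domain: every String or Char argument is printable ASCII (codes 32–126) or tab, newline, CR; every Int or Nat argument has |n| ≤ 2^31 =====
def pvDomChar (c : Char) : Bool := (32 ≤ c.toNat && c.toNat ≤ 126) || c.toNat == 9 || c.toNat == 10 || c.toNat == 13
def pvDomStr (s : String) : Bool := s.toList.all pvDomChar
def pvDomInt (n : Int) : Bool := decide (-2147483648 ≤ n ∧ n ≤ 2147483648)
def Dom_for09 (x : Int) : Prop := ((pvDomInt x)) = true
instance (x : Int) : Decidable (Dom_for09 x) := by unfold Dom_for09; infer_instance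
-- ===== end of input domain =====

-- B replaces A's O(n) counting loop by a closed-form O(1) sum over the four thresholds.

-- ===== PORT A =====
def for09 (x : Int) : Int :=
  let y := x
  let z : Int := 0
  let z := (PySem.List.pyRange 0 (10 + x) 1).foldl
    (fun z i =>
      if i > 5 then
        let z := z + 1
        if i > 6 then
          let z := z + 1
          if i > 7 then
            let z := z + 1
            if i > 8 then z + 1 else z
          else z
        else z
      else z) z
  y + z

-- ===== PORT B =====
def for09_alt (x : Int) : Int :=
  let n := 10 + x
  let z := (([5, 6, 7, 8] : List Int).map (fun t => max 0 (n - 1 - t))).sum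
  x + z

-- ===== PRECONDITION & SPEC =====
def Spec_for09 (x : Int) (out : Int) : Prop := out = for09_alt x
instance (x : Int) (out : Int) : Decidable (Spec_for09 x out) := by unfold Spec_for09; infer_instance

-- ===== CLAIM (what is proved, stated in full; the proofs are below) =====
def Claim_equal_for09 : Prop := ∀ (x : Int), Dom_for09 x → Spec_for09 x (for09 x)

-- ===== LEMMAS AND PROOFS =====

-- per-element weight of A's nested-if body
def pvW (i : Int) : Int :=
  (if 5 < i then (1:Int) else 0) + (if 6 < i then (1:Int) else 0) +
  (if 7 < i then (1:Int) else 0) + (if 8 < i then (1:Int) else 0)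

theorem pvStep_eq (z i : Int) :
    (if i > 5 then
        let z := z + 1
        if i > 6 then
          let z := z + 1
          if i > 7 then
            let z := z + 1
            if i > 8 then z + 1 else z
          else z
        else z
      else z) = z + pvW i := by
  simp only [pvW]
  split_ifs <;> omega

theorem pvSum_range (m : Nat) :
    (((PySem.List.pyRange 0 (m : Int) 1).map pvW).sum) =
      max 0 ((m : Int) - 6) + max 0 ((m : Int) - 7) + max 0 ((m : Int) - 8) + max 0 ((m : Int) - 9) := by
  induction m with
  | zero => simp
  | succ k ih =>
    have h : PySem.List.pyRange 0 ((k : Int) + 1) 1 =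
        PySem.List.pyRange 0 (k : Int) 1 ++ [(k : Int)] :=
      PySem.List.pyRange_one_succ_right (by exact_mod_cast Nat.zero_le k)
    push_cast
    rw [h, List.map_append, List.sum_append]
    rw [ih]
    simp [pvW]
    split_ifs <;> omega

theorem for09_eq (x : Int) : for09 x = for09_alt x := by
  unfold for09 for09_alt
  simp only []
  rw [PySem.List.foldl_congr_mem (g := fun z i => z + pvW i)
      (h := by intro acc i _; exact pvStep_eq acc i)]
  rw [PySem.List.foldl_add]
  by_cases hx : 10 + x ≤ 0
  · rw [PySem.List.pyRange_one_eq_nil (by omega)]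
    simp
    omega
  · have : (10 + x) = (((10 + x).toNat : Nat) : Int) := by omega
    rw [this, pvSum_range]
    simp [List.sum_cons]
    omega

-- ===== VERDICT (by name: the statement is the Claim_ definition above) =====
theorem for09_spec : Claim_equal_for09 := by
  intro x _
  unfold Spec_for09
  exact for09_eq x
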